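-- pv_equiv track=rewrite | github.com/camesruiz/LangDetectTrans | LangDetectTrans.py | get_lang_group
-- ===== SOURCE A (Python) =====
-- def get_lang_group(source_lang):
--
--   gp = source_lang
--
--   GROUP_MEMBERS = {
--   'ZH': ['cmn', 'cn', 'yue', 'ze_zh', 'zh_cn', 'zh_CN', 'zh_HK', 'zh_tw', 'zh_TW', 'zh_yue', 'zhs', 'zht', 'zh'],
--   'ROMANCE': ['fr', 'fr_BE', 'fr_CA', 'fr_FR', 'wa', 'frp', 'oc', 'ca', 'rm', 'lld', 'fur', 'lij', 'lmo', 'es', 'es_AR', 'es_CL', 'es_CO', 'es_CR', 'es_DO', 'es_EC', 'es_ES', 'es_GT', 'es_HN', 'es_MX', 'es_NI', 'es_PA', 'es_PE', 'es_PR', 'es_SV', 'es_UY', 'es_VE', 'pt', 'pt_br', 'pt_BR', 'pt_PT', 'gl', 'lad', 'an', 'mwl', 'it', 'it_IT', 'co', 'nap', 'scn', 'vec', 'sc', 'ro', 'la'],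
--   'NORTH_EU': ['de', 'nl', 'fy', 'af', 'da', 'fo', 'is', 'no', 'nb', 'nn', 'sv'],
--   'SCANDINAVIA': ['da', 'fo', 'is', 'no', 'nb', 'nn', 'sv'],
--   'SAMI': ['se', 'sma', 'smj', 'smn', 'sms'],
--   'NORWAY': ['nb_NO', 'nb', 'nn_NO', 'nn', 'nog', 'no_nb', 'no'],
--   'CELTIC': ['ga', 'cy', 'br', 'gd', 'kw', 'gv']
--   }
--
--   for group, lang_list in GROUP_MEMBERS.items():
--     for lang in lang_list:
--       if lang == source_lang:
--         gp = group
--         break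
--
--   return gp
-- ===== SOURCE B (Python) =====
-- # Flat precomputed code->group table (overlaps between groups already
-- # resolved: a code listed in several groups maps to the last such group,
-- # matching the original's last-match-wins); one dict lookup, no loops.
-- LANG_TO_GROUP = {
--   'cmn': 'ZH',
--   'cn': 'ZH',
--   'yue': 'ZH',
--   'ze_zh': 'ZH',
--   'zh_cn': 'ZH',
--   'zh_CN': 'ZH',
--   'zh_HK': 'ZH',
--   'zh_tw': 'ZH',
--   'zh_TW': 'ZH',
--   'zh_yue': 'ZH',
--   'zhs': 'ZH',
--   'zht': 'ZH',
--   'zh': 'ZH',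
--   'fr': 'ROMANCE',
--   'fr_BE': 'ROMANCE',
--   'fr_CA': 'ROMANCE',
--   'fr_FR': 'ROMANCE',
--   'wa': 'ROMANCE',
--   'frp': 'ROMANCE',
--   'oc': 'ROMANCE',
--   'ca': 'ROMANCE',
--   'rm': 'ROMANCE',
--   'lld': 'ROMANCE',
--   'fur': 'ROMANCE',
--   'lij': 'ROMANCE',
--   'lmo': 'ROMANCE',
--   'es': 'ROMANCE',
--   'es_AR': 'ROMANCE',
--   'es_CL': 'ROMANCE',
--   'es_CO': 'ROMANCE',
--   'es_CR': 'ROMANCE',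
--   'es_DO': 'ROMANCE',
--   'es_EC': 'ROMANCE',
--   'es_ES': 'ROMANCE',
--   'es_GT': 'ROMANCE',
--   'es_HN': 'ROMANCE',
--   'es_MX': 'ROMANCE',
--   'es_NI': 'ROMANCE',
--   'es_PA': 'ROMANCE',
--   'es_PE': 'ROMANCE',
--   'es_PR': 'ROMANCE',
--   'es_SV': 'ROMANCE',
--   'es_UY': 'ROMANCE',
--   'es_VE': 'ROMANCE',
--   'pt': 'ROMANCE',
--   'pt_br': 'ROMANCE',
--   'pt_BR': 'ROMANCE',
--   'pt_PT': 'ROMANCE',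
--   'gl': 'ROMANCE',
--   'lad': 'ROMANCE',
--   'an': 'ROMANCE',
--   'mwl': 'ROMANCE',
--   'it': 'ROMANCE',
--   'it_IT': 'ROMANCE',
--   'co': 'ROMANCE',
--   'nap': 'ROMANCE',
--   'scn': 'ROMANCE',
--   'vec': 'ROMANCE',
--   'sc': 'ROMANCE',
--   'ro': 'ROMANCE',
--   'la': 'ROMANCE',
--   'de': 'NORTH_EU',
--   'nl': 'NORTH_EU',
--   'fy': 'NORTH_EU',
--   'af': 'NORTH_EU',
--   'da': 'SCANDINAVIA',
--   'fo': 'SCANDINAVIA',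
--   'is': 'SCANDINAVIA',
--   'no': 'NORWAY',
--   'nb': 'NORWAY',
--   'nn': 'NORWAY',
--   'sv': 'SCANDINAVIA',
--   'se': 'SAMI',
--   'sma': 'SAMI',
--   'smj': 'SAMI',
--   'smn': 'SAMI',
--   'sms': 'SAMI',
--   'nb_NO': 'NORWAY',
--   'nn_NO': 'NORWAY',
--   'nog': 'NORWAY',
--   'no_nb': 'NORWAY',
--   'ga': 'CELTIC',
--   'cy': 'CELTIC',
--   'br': 'CELTIC',
--   'gd': 'CELTIC',
--   'kw': 'CELTIC',
--   'gv': 'CELTIC',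
-- }
--
--
-- def get_lang_group(source_lang):
--   return LANG_TO_GROUP.get(source_lang, source_lang)
-- ===== Notes on version B (the rewrite author's own statement) =====
-- stated objective: idiomatic
-- what changed: Replaces the nested per-call scan over the group table with a flat precomputed code-to-group dict literal (overlaps between groups resolved once, keeping the original's last-match-wins) and a single .get(source_lang, source_lang) with no loops at all.
import Mathlib
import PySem

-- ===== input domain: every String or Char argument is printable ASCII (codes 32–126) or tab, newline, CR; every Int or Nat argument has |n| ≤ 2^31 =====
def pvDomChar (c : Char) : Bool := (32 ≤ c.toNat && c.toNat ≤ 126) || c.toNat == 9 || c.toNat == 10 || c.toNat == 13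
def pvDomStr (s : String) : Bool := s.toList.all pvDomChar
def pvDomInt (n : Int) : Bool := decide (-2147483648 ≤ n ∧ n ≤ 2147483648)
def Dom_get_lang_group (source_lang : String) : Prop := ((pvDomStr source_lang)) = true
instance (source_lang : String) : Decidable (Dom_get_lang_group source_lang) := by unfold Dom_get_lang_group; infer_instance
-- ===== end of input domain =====

-- B replaces A's nested scan by a flat precomputed code->group table (overlaps
-- already resolved, last group wins as in A) and one lookup with default; idiomatic.

-- ===== PORT A =====
-- the GROUP_MEMBERS dict literal, in insertion order (iterated by .items())
def pvGroupsA : List (String × List String) :=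
  [("ZH", ["cmn", "cn", "yue", "ze_zh", "zh_cn", "zh_CN", "zh_HK", "zh_tw", "zh_TW", "zh_yue", "zhs", "zht", "zh"]),
   ("ROMANCE", ["fr", "fr_BE", "fr_CA", "fr_FR", "wa", "frp", "oc", "ca", "rm", "lld", "fur", "lij", "lmo", "es", "es_AR", "es_CL", "es_CO", "es_CR", "es_DO", "es_EC", "es_ES", "es_GT", "es_HN", "es_MX", "es_NI", "es_PA", "es_PE", "es_PR", "es_SV", "es_UY", "es_VE", "pt", "pt_br", "pt_BR", "pt_PT", "gl", "lad", "an", "mwl", "it", "it_IT", "co", "nap", "scn", "vec", "sc", "ro", "la"]),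
   ("NORTH_EU", ["de", "nl", "fy", "af", "da", "fo", "is", "no", "nb", "nn", "sv"]),
   ("SCANDINAVIA", ["da", "fo", "is", "no", "nb", "nn", "sv"]),
   ("SAMI", ["se", "sma", "smj", "smn", "sms"]),
   ("NORWAY", ["nb_NO", "nb", "nn_NO", "nn", "nog", "no_nb", "no"]),
   ("CELTIC", ["ga", "cy", "br", "gd", "kw", "gv"])]

-- inner 'for lang in lang_list: if lang == source_lang: gp = group; break'
def pvInnerA (src group : String) : List String → String → String
  | [], gp => gp
  | l :: rest, gp => if l == src then group else pvInnerA src group rest gp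

def get_lang_group (source_lang : String) : String :=
  pvGroupsA.foldl (fun gp p => pvInnerA source_lang p.1 p.2 gp) source_lang

-- ===== PORT B =====
-- the LANG_TO_GROUP dict literal of Source B, in insertion order
def pvLangToGroup : PySem.Dict String String :=
  PySem.Dict.mk
  [("cmn", "ZH"),
   ("cn", "ZH"),
   ("yue", "ZH"),
   ("ze_zh", "ZH"),
   ("zh_cn", "ZH"),
   ("zh_CN", "ZH"),
   ("zh_HK", "ZH"),
   ("zh_tw", "ZH"),
   ("zh_TW", "ZH"),
   ("zh_yue", "ZH"),
   ("zhs", "ZH"),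
   ("zht", "ZH"),
   ("zh", "ZH"),
   ("fr", "ROMANCE"),
   ("fr_BE", "ROMANCE"),
   ("fr_CA", "ROMANCE"),
   ("fr_FR", "ROMANCE"),
   ("wa", "ROMANCE"),
   ("frp", "ROMANCE"),
   ("oc", "ROMANCE"),
   ("ca", "ROMANCE"),
   ("rm", "ROMANCE"),
   ("lld", "ROMANCE"),
   ("fur", "ROMANCE"),
   ("lij", "ROMANCE"),
   ("lmo", "ROMANCE"),
   ("es", "ROMANCE"),
   ("es_AR", "ROMANCE"),
   ("es_CL", "ROMANCE"),
   ("es_CO", "ROMANCE"),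
   ("es_CR", "ROMANCE"),
   ("es_DO", "ROMANCE"),
   ("es_EC", "ROMANCE"),
   ("es_ES", "ROMANCE"),
   ("es_GT", "ROMANCE"),
   ("es_HN", "ROMANCE"),
   ("es_MX", "ROMANCE"),
   ("es_NI", "ROMANCE"),
   ("es_PA", "ROMANCE"),
   ("es_PE", "ROMANCE"),
   ("es_PR", "ROMANCE"),
   ("es_SV", "ROMANCE"),
   ("es_UY", "ROMANCE"),
   ("es_VE", "ROMANCE"),
   ("pt", "ROMANCE"),
   ("pt_br", "ROMANCE"),
   ("pt_BR", "ROMANCE"),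
   ("pt_PT", "ROMANCE"),
   ("gl", "ROMANCE"),
   ("lad", "ROMANCE"),
   ("an", "ROMANCE"),
   ("mwl", "ROMANCE"),
   ("it", "ROMANCE"),
   ("it_IT", "ROMANCE"),
   ("co", "ROMANCE"),
   ("nap", "ROMANCE"),
   ("scn", "ROMANCE"),
   ("vec", "ROMANCE"),
   ("sc", "ROMANCE"),
   ("ro", "ROMANCE"),
   ("la", "ROMANCE"),
   ("de", "NORTH_EU"),
   ("nl", "NORTH_EU"),
   ("fy", "NORTH_EU"),
   ("af", "NORTH_EU"),
   ("da", "SCANDINAVIA"),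
   ("fo", "SCANDINAVIA"),
   ("is", "SCANDINAVIA"),
   ("no", "NORWAY"),
   ("nb", "NORWAY"),
   ("nn", "NORWAY"),
   ("sv", "SCANDINAVIA"),
   ("se", "SAMI"),
   ("sma", "SAMI"),
   ("smj", "SAMI"),
   ("smn", "SAMI"),
   ("sms", "SAMI"),
   ("nb_NO", "NORWAY"),
   ("nn_NO", "NORWAY"),
   ("nog", "NORWAY"),
   ("no_nb", "NORWAY"),
   ("ga", "CELTIC"),
   ("cy", "CELTIC"),
   ("br", "CELTIC"),
   ("gd", "CELTIC"),
   ("kw", "CELTIC"),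
   ("gv", "CELTIC")]

def get_lang_group_alt (source_lang : String) : String :=
  pvLangToGroup.getD source_lang source_lang

-- ===== PRECONDITION & SPEC =====
def Spec_get_lang_group (source_lang : String) (out : String) : Prop := out = get_lang_group_alt source_lang
instance (source_lang : String) (out : String) : Decidable (Spec_get_lang_group source_lang out) := by unfold Spec_get_lang_group; infer_instance

-- ===== CLAIM =====
def Claim_equal_get_lang_group : Prop := ∀ (source_lang : String), Dom_get_lang_group source_lang → Spec_get_lang_group source_lang (get_lang_group source_lang)

-- ===== LEMMAS AND PROOFS =====

-- A's inner loop returns `group` iff the list contains the source language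
theorem pvInnerA_eq (src group : String) (langs : List String) (gp : String) :
    pvInnerA src group langs gp = if langs.contains src then group else gp := by
  induction langs with
  | nil => simp [pvInnerA]
  | cons l rest ih =>
    by_cases h : src = l
    · subst h; simp [pvInnerA]
    · have hb : (l == src) = false := beq_eq_false_iff_ne.mpr (Ne.symm h)
      simp [pvInnerA, hb, ih, h]

-- an insert-all loop used only in the proofs, to rebuild pvLangToGroup from pvGroupsA
def pvBuild (groups : List (String × List String)) : PySem.Dict String String :=
  groups.foldl (fun d p => p.2.foldl (fun d l => d.insert l p.1) d) PySem.Dict.empty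

theorem pvInsertAll_get? (langs : List String) (g : String)
    (d : PySem.Dict String String) (src : String) :
    ((langs.foldl (fun d l => d.insert l g) d).get? src)
      = if langs.contains src then some g else d.get? src := by
  induction langs generalizing d with
  | nil => simp
  | cons l rest ih =>
    simp only [List.foldl_cons, List.contains_cons, ih]
    by_cases h : src = l
    · subst h
      simp [PySem.Dict.get?_insert_self]
    · simp [PySem.Dict.get?_insert_of_ne _ _ h, h]

-- once the source language is a key of the dict, it stays one through the build
theorem pvBuild_isSome (src : String) (groups : List (String × List String)) :
    ∀ (d : PySem.Dict String String), (d.get? src).isSome →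
      ((groups.foldl (fun d p => p.2.foldl (fun d l => d.insert l p.1) d) d).get? src).isSome := by
  induction groups with
  | nil => intro d h; simpa using h
  | cons p rest ih =>
    intro d h
    simp only [List.foldl_cons]
    apply ih
    rw [pvInsertAll_get?]
    by_cases hc : src ∈ p.2 <;> simp [hc, h]

-- main invariant: A's fold equals lookup in the dict built from the same table
theorem pv_main (src : String) (groups : List (String × List String)) :
    ∀ (gp : String) (d : PySem.Dict String String), (d.get? src).getD gp = gp →
      groups.foldl (fun gp p => pvInnerA src p.1 p.2 gp) gp
        = ((groups.foldl (fun d p => p.2.foldl (fun d l => d.insert l p.1) d) d).get? src).getD gp := by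
  induction groups with
  | nil => intro gp d h; simpa using h.symm
  | cons p rest ih =>
    intro gp d h
    simp only [List.foldl_cons]
    rw [pvInnerA_eq]
    by_cases hc : p.2.contains src
    · rw [if_pos hc, ih p.1 (p.2.foldl (fun d l => d.insert l p.1) d) (by rw [pvInsertAll_get?, if_pos hc]; rfl)]
      have hs := pvBuild_isSome src rest (p.2.foldl (fun d l => d.insert l p.1) d)
        (by rw [pvInsertAll_get?, if_pos hc]; rfl)
      obtain ⟨v, hv⟩ := Option.isSome_iff_exists.mp hs
      rw [hv]; rfl
    · rw [if_neg hc]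
      exact ih gp (p.2.foldl (fun d l => d.insert l p.1) d) (by rw [pvInsertAll_get?, if_neg hc]; exact h)

-- Source B's literal table is exactly the dict built from A's table (checked by evaluation)
set_option maxRecDepth 40000 in
set_option maxHeartbeats 1000000 in
theorem pvBuild_eq_literal : pvBuild pvGroupsA = pvLangToGroup := by decide

theorem get_lang_group_spec : Claim_equal_get_lang_group := by
  intro src _
  unfold Spec_get_lang_group get_lang_group get_lang_group_alt
  rw [PySem.Dict.getD_eq_get?_getD, ← pvBuild_eq_literal]
  exact pv_main src pvGroupsA src PySem.Dict.empty (by simp)
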